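-- pv_equiv track=rewrite | github.com/dokkyunYU/Algorithm_practice | 프로그래머스/lv1/17681. ［1차］ 비밀지도/［1차］ 비밀지도.py | solution
-- ===== SOURCE A (Python) =====
-- def solution(n, arr1, arr2):
--     maze_string = ""
--     answer = []
--     for i in range(n):
--         for j in range(n-1, -1, -1):
--             maze_string += "#" if arr1[i] & 1 << j or arr2[i] & 1 << j else " "
--         answer.append(maze_string)
--         maze_string = ""
--     return answer
-- ===== SOURCE B (Python) =====
-- def solution(n, arr1, arr2):
--     tr = str.maketrans("10", "# ")
--     return [format((arr1[i] | arr2[i]) & ((1 << n) - 1), f"0{n}b").translate(tr)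
--             for i in range(n)]
-- ===== Notes on version B (the rewrite author's own statement) =====
-- stated objective: simpler
-- what changed: Replaces the explicit inner bit-by-bit loop with one string-formatting step per row: mask arr1[i]|arr2[i] to n bits, zero-pad with format(m, f'0{n}b'), and translate '1'/'0' to '#'/' '.
-- outside the precondition, e.g. on solution(1, [-1], []): A returns ['#'], B raises IndexError
import Mathlib
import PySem

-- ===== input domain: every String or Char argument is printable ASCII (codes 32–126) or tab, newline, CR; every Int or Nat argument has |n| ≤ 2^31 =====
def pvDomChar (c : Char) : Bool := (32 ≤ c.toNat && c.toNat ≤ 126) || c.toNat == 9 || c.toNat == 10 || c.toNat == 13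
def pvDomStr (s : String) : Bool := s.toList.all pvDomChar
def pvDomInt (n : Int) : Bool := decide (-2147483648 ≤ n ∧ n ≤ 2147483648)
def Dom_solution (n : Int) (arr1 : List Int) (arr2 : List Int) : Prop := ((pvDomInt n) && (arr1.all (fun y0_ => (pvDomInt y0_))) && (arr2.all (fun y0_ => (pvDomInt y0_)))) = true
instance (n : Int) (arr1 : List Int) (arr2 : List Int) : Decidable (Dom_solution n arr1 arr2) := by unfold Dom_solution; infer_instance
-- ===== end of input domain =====

-- B replaces A's inner bit-by-bit loop by one mask-and-format step per row (objective: simpler).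

-- ===== PORT A =====
-- maze_string is carried as its list of characters (String.mk at append time);
-- arr1[i]/arr2[i] are PySem.List.pyGetD under Pre_'s in-range condition; j ≥ 0 inside
-- range(n-1,-1,-1), so 1 << j is (1 : Int) <<< j.toNat exactly; the truthiness of
-- 'x or y' for ints under 'if' is the disjunction x ≠ 0 ∨ y ≠ 0.
def solution (n : Int) (arr1 : List Int) (arr2 : List Int) : List String :=
  (PySem.List.pyRange 0 n 1).foldl (fun answer i =>
    answer ++ [String.mk ((PySem.List.pyRange (n-1) (-1) (-1)).foldl (fun s j =>
      s ++ [if PySem.Int.band (PySem.List.pyGetD arr1 i 0) ((1:Int) <<< (j.toNat : Int)) ≠ 0 ∨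
               PySem.Int.band (PySem.List.pyGetD arr2 i 0) ((1:Int) <<< (j.toNat : Int)) ≠ 0
            then '#' else ' ']) [])]) []

-- ===== PORT B =====
-- binCharsAux m: the binary digits of m > 0, most significant first (empty for 0).
def binCharsAux (m : Nat) : List Char :=
  if h : m = 0 then [] else binCharsAux (m/2) ++ [if m % 2 = 1 then '1' else '0']
  decreasing_by exact Nat.div_lt_self (Nat.pos_of_ne_zero h) one_lt_two

-- port of format(m, f'0{w}b') for m ≥ 0: binary digits of m left-padded with '0' to width w
def fmtBin (w : Nat) (m : Nat) : List Char :=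
  let s := if m = 0 then ['0'] else binCharsAux m
  List.replicate (w - s.length) '0' ++ s

-- port of .translate(str.maketrans("10", "# "))
def trChar (c : Char) : Char := if c = '1' then '#' else ' '

def solution_alt (n : Int) (arr1 : List Int) (arr2 : List Int) : List String :=
  (PySem.List.pyRange 0 n 1).map (fun i =>
    String.mk ((fmtBin n.toNat
      (PySem.Int.band
        (PySem.Int.bor (PySem.List.pyGetD arr1 i 0) (PySem.List.pyGetD arr2 i 0))
        ((1:Int) <<< (n.toNat : Int) - 1)).toNat).map trChar))

-- ===== PRECONDITION & SPEC =====
-- Pre_ asks both arrays to have at least n rows. It excludes, besides the inputs where A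
-- itself raises IndexError, the inputs with arr2 shorter than n on which A still returns
-- only because 'or' short-circuits past arr2[i] when every bit of arr1[i] is set; B always
-- reads arr2[i] and raises IndexError there.
def Pre_solution (n : Int) (arr1 : List Int) (arr2 : List Int) : Prop :=
  n ≤ (arr1.length : Int) ∧ n ≤ (arr2.length : Int)
instance (n : Int) (arr1 : List Int) (arr2 : List Int) : Decidable (Pre_solution n arr1 arr2) := by unfold Pre_solution; infer_instance

def pvWitness_solution : Int × List Int × List Int := (2, [9, 20], [30, 1])

def Spec_solution (n : Int) (arr1 : List Int) (arr2 : List Int) (out : List String) : Prop := out = solution_alt n arr1 arr2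
instance (n : Int) (arr1 : List Int) (arr2 : List Int) (out : List String) : Decidable (Spec_solution n arr1 arr2 out) := by unfold Spec_solution; infer_instance

-- ===== CLAIM (what is proved, stated in full; the proofs are below) =====
def Claim_equal_solution : Prop := ∀ (n : Int) (arr1 : List Int) (arr2 : List Int), Dom_solution n arr1 arr2 → Pre_solution n arr1 arr2 → Spec_solution n arr1 arr2 (solution n arr1 arr2)

-- ===== LEMMAS AND PROOFS =====

theorem shift_one (j : Nat) : (1:Int) <<< (j:Int) = ((2^j : Nat) : Int) :=
  Int.one_shiftLeft j

theorem and_mod_two_iff (x y : Nat) : (x &&& y) % 2 = 1 ↔ (x % 2 = 1 ∧ y % 2 = 1) := by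
  have h := Nat.testBit_and x y 0
  simp only [Nat.testBit_zero] at h
  have h2 : ((x &&& y) % 2 = 1) = ((x % 2 = 1) ∧ (y % 2 = 1)) := by
    simpa using congrArg (· = true) h
  exact Iff.of_eq h2

theorem testBit_sub_and (j : Nat) (x y : Nat) :
    (x - (x &&& y)).testBit j = (x.testBit j && !(y.testBit j)) := by
  induction j generalizing x y with
  | zero =>
      have hdiv : (x &&& y) / 2 = (x/2) &&& (y/2) := Nat.and_div_two
      have hm := and_mod_two_iff x y
      have hle : (x/2) &&& (y/2) ≤ x/2 := Nat.and_le_left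
      simp only [Nat.testBit_zero]
      by_cases h1 : x % 2 = 1 <;> by_cases h2 : y % 2 = 1 <;> simp [h1, h2] <;> omega
  | succ j ih =>
      have hdiv : (x &&& y) / 2 = (x/2) &&& (y/2) := Nat.and_div_two
      have hm := and_mod_two_iff x y
      have hle : (x/2) &&& (y/2) ≤ x/2 := Nat.and_le_left
      have hd2 : (x - (x &&& y)) / 2 = x/2 - ((x/2) &&& (y/2)) := by omega
      rw [← Nat.testBit_div_two, hd2, ih, Nat.testBit_div_two, Nat.testBit_div_two]


def bitOf (x : Int) (j : Nat) : Bool :=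
  if 0 ≤ x then x.toNat.testBit j else !((-x-1).toNat.testBit j)

theorem bitOf_natCast (w j : Nat) : bitOf (w:Int) j = w.testBit j := by
  simp [bitOf, Int.natCast_nonneg]

theorem bitOf_neg_natCast (w j : Nat) : bitOf (-(w:Int) - 1) j = !(w.testBit j) := by
  have hneg : ¬ (0:Int) ≤ -(w:Int) - 1 := by
    have := Int.natCast_nonneg w; omega
  have ht : (-(-(w:Int) - 1) - 1) = (w:Int) := by ring
  rw [bitOf, if_neg hneg, ht, Int.toNat_natCast]

theorem bitOf_of_nonneg {a : Int} (ha : 0 ≤ a) (j : Nat) : bitOf a j = a.toNat.testBit j := by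
  simp [bitOf, ha]

theorem bitOf_of_neg {a : Int} (ha : ¬ 0 ≤ a) (j : Nat) : bitOf a j = !((-a-1).toNat.testBit j) := by
  simp [bitOf, ha]

theorem band_pow (x : Int) (j : Nat) :
    (PySem.Int.band x ((2^j : Nat) : Int) ≠ 0) ↔ bitOf x j = true := by
  have hp : (0:Int) ≤ ((2^j : Nat) : Int) := Int.natCast_nonneg _
  have hpow : (0:Nat) < 2^j := Nat.two_pow_pos j
  by_cases hx : 0 ≤ x
  · have hv : PySem.Int.band x ((2^j : Nat) : Int) = ((x.toNat &&& 2^j : Nat) : Int) := by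
      simp only [PySem.Int.band]
      rw [if_pos hx, if_pos hp, Int.toNat_natCast]
    rw [hv, bitOf_of_nonneg hx]
    rw [Nat.and_two_pow]
    cases h : x.toNat.testBit j <;> simp [h] <;> omega
  · have hv : PySem.Int.band x ((2^j : Nat) : Int) = ((2^j - (2^j &&& (-x-1).toNat) : Nat) : Int) := by
      simp only [PySem.Int.band]
      rw [if_neg hx, if_pos hp, Int.toNat_natCast]
    rw [hv, bitOf_of_neg hx, Nat.and_comm, Nat.and_two_pow]
    cases h : (-x-1).toNat.testBit j <;> simp [h] <;> omega

theorem bitOf_bor (a b : Int) (j : Nat) :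
    bitOf (PySem.Int.bor a b) j = (bitOf a j || bitOf b j) := by
  by_cases ha : 0 ≤ a <;> by_cases hb : 0 ≤ b
  · have hv : PySem.Int.bor a b = ((a.toNat ||| b.toNat : Nat) : Int) := by
      simp only [PySem.Int.bor]
      rw [if_pos ha, if_pos hb]
    rw [hv, bitOf_natCast, Nat.testBit_or, bitOf_of_nonneg ha, bitOf_of_nonneg hb]
  · have hv : PySem.Int.bor a b = -(((-b-1).toNat - ((-b-1).toNat &&& a.toNat) : Nat) : Int) - 1 := by
      simp only [PySem.Int.bor]
      rw [if_pos ha, if_neg hb]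
    rw [hv, bitOf_neg_natCast, testBit_sub_and, bitOf_of_nonneg ha, bitOf_of_neg hb]
    cases h1 : (-b-1).toNat.testBit j <;> cases h2 : a.toNat.testBit j <;> simp
  · have hv : PySem.Int.bor a b = -(((-a-1).toNat - ((-a-1).toNat &&& b.toNat) : Nat) : Int) - 1 := by
      simp only [PySem.Int.bor]
      rw [if_neg ha, if_pos hb]
    rw [hv, bitOf_neg_natCast, testBit_sub_and, bitOf_of_neg ha, bitOf_of_nonneg hb]
    cases h1 : (-a-1).toNat.testBit j <;> cases h2 : b.toNat.testBit j <;> simp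
  · have hv : PySem.Int.bor a b = -(((-a-1).toNat &&& (-b-1).toNat : Nat) : Int) - 1 := by
      simp only [PySem.Int.bor]
      rw [if_neg ha, if_neg hb]
    rw [hv, bitOf_neg_natCast, Nat.testBit_and, bitOf_of_neg ha, bitOf_of_neg hb]
    cases h1 : (-a-1).toNat.testBit j <;> cases h2 : (-b-1).toNat.testBit j <;> simp

theorem band_mask (y : Int) (N : Nat) :
    (PySem.Int.band y ((2^N - 1 : Nat) : Int)).toNat < 2^N ∧
    ∀ j, j < N → (PySem.Int.band y ((2^N - 1 : Nat) : Int)).toNat.testBit j = bitOf y j := by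
  have hpow : (0:Nat) < 2^N := Nat.two_pow_pos N
  have hp : (0:Int) ≤ ((2^N - 1 : Nat) : Int) := Int.natCast_nonneg _
  by_cases hy : 0 ≤ y
  · have hv : PySem.Int.band y ((2^N - 1 : Nat) : Int) = ((y.toNat &&& (2^N - 1) : Nat) : Int) := by
      simp only [PySem.Int.band]
      rw [if_pos hy, if_pos hp, Int.toNat_natCast]
    rw [hv, Int.toNat_natCast]
    constructor
    · have := Nat.and_le_right (n := y.toNat) (m := 2^N - 1); omega
    · intro j hj
      rw [Nat.testBit_and, Nat.testBit_two_pow_sub_one, bitOf_of_nonneg hy]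
      simp [hj]
  · have hv : PySem.Int.band y ((2^N - 1 : Nat) : Int) =
        (((2^N - 1) - ((2^N - 1) &&& (-y-1).toNat) : Nat) : Int) := by
      simp only [PySem.Int.band]
      rw [if_neg hy, if_pos hp, Int.toNat_natCast]
    rw [hv, Int.toNat_natCast]
    constructor
    · omega
    · intro j hj
      rw [testBit_sub_and, Nat.testBit_two_pow_sub_one, bitOf_of_neg hy]
      simp [hj]


theorem binCharsAux_zero : binCharsAux 0 = [] := by
  rw [binCharsAux]
  simp

theorem map_range_const (N : Nat) (c : Char) :
    (List.range N).map (fun _ => c) = List.replicate N c := by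
  induction N with
  | zero => rfl
  | succ N ih => rw [List.range_succ, List.map_append, ih, List.replicate_succ']; rfl

theorem padbin (N : Nat) (r : Nat) (hr : r < 2^N) :
    (List.replicate (N - (binCharsAux r).length) '0' ++ binCharsAux r).reverse =
    (List.range N).map (fun k => if r.testBit k then '1' else '0') := by
  induction N generalizing r with
  | zero =>
      have h0 : r = 0 := by simpa using hr
      subst h0
      simp [binCharsAux_zero]
  | succ N ih =>
      by_cases h0 : r = 0
      · subst h0
        rw [binCharsAux_zero]
        simp [Nat.zero_testBit, map_range_const]
      · have hd : r / 2 < 2^N := by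
          have h2 : 2^(N+1) = 2^N * 2 := by ring
          omega
        rw [binCharsAux, dif_neg h0]
        have hlen : N + 1 - (binCharsAux (r/2) ++ [if r % 2 = 1 then '1' else '0']).length
            = N - (binCharsAux (r/2)).length := by
          simp only [List.length_append, List.length_cons, List.length_nil]
          omega
        rw [hlen, ← List.append_assoc, List.reverse_append (bs := [if r % 2 = 1 then '1' else '0'])]
        simp only [List.reverse_cons, List.reverse_nil, List.nil_append]
        rw [ih (r/2) hd, List.range_succ_eq_map, List.map_cons, List.map_map]
        have hhead : (if r % 2 = 1 then '1' else '0') = (if r.testBit 0 = true then '1' else '0') := by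
          simp [Nat.testBit_zero]
        have htail : (List.range N).map (fun k => if (r/2).testBit k = true then '1' else '0')
            = (List.range N).map ((fun k => if r.testBit k = true then '1' else '0') ∘ Nat.succ) := by
          refine List.map_congr_left ?_
          intro k _
          simp [Function.comp, Nat.testBit_div_two]
        rw [hhead, htail, List.singleton_append]

theorem fmtBin_def (w m : Nat) : fmtBin w m =
    List.replicate (w - (if m = 0 then ['0'] else binCharsAux m).length) '0' ++
      (if m = 0 then ['0'] else binCharsAux m) := rfl

theorem fmtBin_reverse (N : Nat) (hN : 0 < N) (r : Nat) (hr : r < 2^N) :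
    (fmtBin N r).reverse = (List.range N).map (fun k => if r.testBit k then '1' else '0') := by
  by_cases h0 : r = 0
  · subst h0
    rw [fmtBin_def, if_pos rfl]
    have h1 : (List.replicate (N - (['0'] : List Char).length) '0' ++ ['0']).reverse
        = List.replicate N '0' := by
      rw [List.reverse_append, List.reverse_replicate]
      show '0' :: List.replicate (N - (['0'] : List Char).length) '0' = _
      rw [← List.replicate_succ]
      congr 1
      simp only [List.length_cons, List.length_nil]
      omega
    rw [h1]
    simp [Nat.zero_testBit, map_range_const]
  · rw [fmtBin_def, if_neg h0]
    exact padbin N r hr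

theorem reverse_map_range (N : Nat) (f : Nat → Char) :
    ((List.range N).map f).reverse = (List.range N).map (fun k => f (N-1-k)) := by
  apply List.ext_getElem
  · simp
  · intro i h1 h2
    simp only [List.length_reverse, List.length_map, List.length_range] at h1 h2
    rw [List.getElem_reverse, List.getElem_map, List.getElem_map, List.getElem_range,
        List.getElem_range]
    congr 1
    all_goals simp only [List.length_map, List.length_range]


theorem row_eq (N : Nat) (hN : 0 < N) (a b : Int) :
    (PySem.List.pyRange ((N:Int)-1) (-1) (-1)).map (fun j =>
      if PySem.Int.band a ((1:Int) <<< (j.toNat : Int)) ≠ 0 ∨ PySem.Int.band b ((1:Int) <<< (j.toNat : Int)) ≠ 0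
      then '#' else ' ')
    = (fmtBin N (PySem.Int.band (PySem.Int.bor a b) ((1:Int) <<< (N:Int) - 1)).toNat).map trChar := by
  have hpow : (0:Nat) < 2^N := Nat.two_pow_pos N
  have hmask : (1:Int) <<< (N:Int) - 1 = ((2^N - 1 : Nat) : Int) := by
    rw [shift_one]
    omega
  rw [hmask]
  obtain ⟨hrlt, hrbit⟩ := band_mask (PySem.Int.bor a b) N
  set r := (PySem.Int.band (PySem.Int.bor a b) ((2^N - 1 : Nat) : Int)).toNat with hrdef
  rw [← List.reverse_inj, PySem.List.pyRange_neg_one]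
  have hnn : ((N:Int) - 1 - -1).toNat = N := by omega
  rw [hnn, List.map_map, reverse_map_range]
  rw [← List.map_reverse, fmtBin_reverse N hN r hrlt, List.map_map]
  refine List.map_congr_left ?_
  intro k hk
  simp only [List.mem_range] at hk
  simp only [Function.comp]
  have hjt : ((N:Int) - 1 - ((N - 1 - k : Nat) : Int)).toNat = k := by omega
  rw [hjt, shift_one]
  have hbit : r.testBit k = (bitOf a k || bitOf b k) := by
    rw [hrbit k hk, bitOf_bor]
  have hab : (PySem.Int.band a ((2^k : Nat) : Int) ≠ 0 ∨ PySem.Int.band b ((2^k : Nat) : Int) ≠ 0)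
      ↔ (bitOf a k || bitOf b k) = true := by
    rw [Bool.or_eq_true]
    exact or_congr (band_pow a k) (band_pow b k)
  cases hcase : r.testBit k
  · have hno : ¬ (PySem.Int.band a ((2^k : Nat) : Int) ≠ 0 ∨
        PySem.Int.band b ((2^k : Nat) : Int) ≠ 0) := by
      rw [hab, ← hbit, hcase]
      simp
    rw [if_neg hno]
    simp [trChar]
  · have hyes : (PySem.Int.band a ((2^k : Nat) : Int) ≠ 0 ∨
        PySem.Int.band b ((2^k : Nat) : Int) ≠ 0) := by
      rw [hab, ← hbit, hcase]
    rw [if_pos hyes]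
    simp [trChar]

-- ===== VERDICT (by name: the statement is the Claim_ definition above) =====
theorem solution_spec : Claim_equal_solution := by
  intro n arr1 arr2 _ _
  unfold Spec_solution solution solution_alt
  rw [PySem.List.foldl_append_singleton_eq_map, List.nil_append]
  refine List.map_congr_left ?_
  intro i hi
  rw [PySem.List.mem_pyRange_one] at hi
  have hNpos : 0 < n.toNat := by omega
  have hn1 : n - 1 = ((n.toNat : Nat) : Int) - 1 := by omega
  congr 1
  rw [PySem.List.foldl_append_singleton_eq_map, List.nil_append, hn1]
  exact row_eq n.toNat hNpos _ _
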